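-- pv_equiv track=rewrite | github.com/Barabacha474/LocalTextDungeonMaster | Codes/FaissVectorDB.py | _chunk_query
-- ===== SOURCE A (Python) =====
-- from typing import List, Dict, Any, Optional, Set
--
-- def _chunk_query(query: str, chunk_size: int = 200) -> List[str]:
--     """
--     Split a long query into smaller chunks for better search coverage.
--
--     Args:
--         query: The original query text
--         chunk_size: Maximum number of words per chunk
--
--     Returns:
--         List of query chunks
--     """
--     if not query or chunk_size <= 0:
--         return [query] if query else []
--
--     # Split query into words
--     words = query.split()
--
--     if len(words) <= chunk_size:
--         return [query]
--
--     # Create chunks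
--     chunks = []
--     for i in range(0, len(words), chunk_size):
--         chunk = ' '.join(words[i:i + chunk_size])
--         chunks.append(chunk)
--
--     # Ensure we don't lose context by adding overlapping chunks
--     # This helps capture information that might be split at chunk boundaries
--     if len(chunks) > 1:
--         overlapping_chunks = []
--         for i in range(len(chunks) - 1):
--             # Create overlapping chunks with 25% overlap
--             overlap_size = max(1, chunk_size // 4)
--             if i == 0:
--                 overlapping_chunks.append(chunks[i])
--
--             # Create overlapping chunk between current and next
--             current_words = chunks[i].split()
--             next_words = chunks[i + 1].split()
--
--             # Take last overlap_size words from current and first overlap_size from next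
--             overlap = ' '.join(current_words[-overlap_size:] + next_words[:overlap_size])
--             overlapping_chunks.append(overlap)
--
--             if i == len(chunks) - 2:
--                 overlapping_chunks.append(chunks[i + 1])
--
--         chunks = overlapping_chunks
--
--     return chunks
-- ===== SOURCE B (Python) =====
-- from typing import List
--
-- def _chunk_query(query: str, chunk_size: int = 200) -> List[str]:
--     if not query or chunk_size <= 0:
--         return [query] if query else []
--     words = query.split()
--     n = len(words)
--     if n <= chunk_size:
--         return [query]
--     # One pass: first chunk, then every boundary's contiguous overlap window, then the last chunk.
--     n_chunks = -(-n // chunk_size)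
--     ov = max(1, chunk_size // 4)
--     out = [' '.join(words[:chunk_size])]
--     for i in range(1, n_chunks):
--         b = i * chunk_size
--         out.append(' '.join(words[b - ov:b + ov]))
--     out.append(' '.join(words[(n_chunks - 1) * chunk_size:]))
--     return out
-- ===== Notes on version B (the rewrite author's own statement) =====
-- stated objective: alternative
-- what changed: B drops A's two-pass build-all-chunks-then-re-split-adjacent-pairs interleave: it emits in one index-driven pass the first chunk, each boundary's overlap as a single contiguous slice of the word list joined once, and the last chunk, never materialising or re-splitting the middle chunk strings.
import Mathlib
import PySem

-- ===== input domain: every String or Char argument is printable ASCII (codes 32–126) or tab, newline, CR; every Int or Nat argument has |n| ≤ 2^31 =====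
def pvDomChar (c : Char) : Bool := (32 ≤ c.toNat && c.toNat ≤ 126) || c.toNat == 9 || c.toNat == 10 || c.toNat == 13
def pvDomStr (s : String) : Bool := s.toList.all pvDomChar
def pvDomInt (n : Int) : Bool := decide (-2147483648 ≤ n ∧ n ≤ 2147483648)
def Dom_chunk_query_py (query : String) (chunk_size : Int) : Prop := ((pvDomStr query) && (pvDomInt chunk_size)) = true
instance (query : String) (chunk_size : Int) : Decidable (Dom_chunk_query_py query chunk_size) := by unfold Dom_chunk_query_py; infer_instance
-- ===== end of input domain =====

-- B replaces A's build-all-chunks-then-re-split-pairs interleave by one direct pass emitting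
-- first chunk, each boundary's contiguous overlap slice, last chunk (alternative decomposition).

-- ===== PORT A =====
-- literal transliteration of _chunk_query; list indexing chunks[i] is always in range in the
-- loop, ported as pyGetD with default "" (exact there).
def chunk_query_py (query : String) (chunk_size : Int) : List String :=
  if query = "" ∨ chunk_size ≤ 0 then
    (if query ≠ "" then [query] else [])
  else
    let words := PySem.Chars.split₀ query.toList
    if (words.length : Int) ≤ chunk_size then [query]
    else
      let chunks := (PySem.List.pyRange 0 (words.length : Int) chunk_size).foldl
        (fun acc i => acc ++
          [String.ofList (PySem.Chars.join [' ']
            (PySem.List.slice words (some i) (some (i + chunk_size))))]) []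
      if 1 < chunks.length then
        (PySem.List.pyRange 0 ((chunks.length : Int) - 1) 1).foldl
          (fun oc i =>
            let overlap_size := max 1 (PySem.Int.floordiv chunk_size 4)
            let oc := if i = 0 then oc ++ [PySem.List.pyGetD chunks i ""] else oc
            let current_words := PySem.Chars.split₀ (PySem.List.pyGetD chunks i "").toList
            let next_words := PySem.Chars.split₀ (PySem.List.pyGetD chunks (i + 1) "").toList
            let overlap := String.ofList (PySem.Chars.join [' ']
              (PySem.List.slice current_words (some (-overlap_size)) none
                ++ PySem.List.slice next_words none (some overlap_size)))
            let oc := oc ++ [overlap]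
            if i = (chunks.length : Int) - 2 then oc ++ [PySem.List.pyGetD chunks (i + 1) ""]
            else oc) []
      else chunks

-- ===== PORT B =====
def chunk_query_py_alt (query : String) (chunk_size : Int) : List String :=
  if query = "" ∨ chunk_size ≤ 0 then
    (if query ≠ "" then [query] else [])
  else
    let words := PySem.Chars.split₀ query.toList
    let n : Int := words.length
    if n ≤ chunk_size then [query]
    else
      let n_chunks := -(PySem.Int.floordiv (-n) chunk_size)
      let ov := max 1 (PySem.Int.floordiv chunk_size 4)
      let out := [String.ofList (PySem.Chars.join [' ']
        (PySem.List.slice words none (some chunk_size)))]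
      let out := (PySem.List.pyRange 1 n_chunks 1).foldl
        (fun out i =>
          let b := i * chunk_size
          out ++ [String.ofList (PySem.Chars.join [' ']
            (PySem.List.slice words (some (b - ov)) (some (b + ov))))]) out
      out ++ [String.ofList (PySem.Chars.join [' ']
        (PySem.List.slice words (some ((n_chunks - 1) * chunk_size)) none))]

-- ===== PRECONDITION & SPEC =====
def Spec_chunk_query_py (query : String) (chunk_size : Int) (out : List String) : Prop := out = chunk_query_py_alt query chunk_size
instance (query : String) (chunk_size : Int) (out : List String) : Decidable (Spec_chunk_query_py query chunk_size out) := by unfold Spec_chunk_query_py; infer_instance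

-- ===== CLAIM (what is proved, stated in full; the proofs are below) =====
def Claim_equal_chunk_query_py : Prop := ∀ (query : String) (chunk_size : Int), Dom_chunk_query_py query chunk_size → Spec_chunk_query_py query chunk_size (chunk_query_py query chunk_size)

-- ===== LEMMAS AND PROOFS =====

-- step lemmas for PySem.Chars.split₀.go (its two defining equations, by unfolding)
theorem go_cons (c : Char) (rest cur : List Char) (acc : List (List Char)) :
    PySem.Chars.split₀.go (c :: rest) cur acc =
      (if PySem.Chars.isspace c then
        (if cur.isEmpty then PySem.Chars.split₀.go rest [] acc
         else PySem.Chars.split₀.go rest [] (cur.reverse :: acc))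
       else PySem.Chars.split₀.go rest (c :: cur) acc) := by
  rw [PySem.Chars.split₀.go]

theorem go_nil (cur : List Char) (acc : List (List Char)) :
    PySem.Chars.split₀.go [] cur acc =
      (if cur.isEmpty then acc.reverse else (cur.reverse :: acc).reverse) := by
  rw [PySem.Chars.split₀.go]

theorem go_nospace (w : List Char) (h : ∀ ch ∈ w, PySem.Chars.isspace ch = false) :
    ∀ (rest cur : List Char) (acc : List (List Char)),
    PySem.Chars.split₀.go (w ++ rest) cur acc = PySem.Chars.split₀.go rest (w.reverse ++ cur) acc := by
  induction w with
  | nil => intro rest cur acc; simp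
  | cons c w ih =>
      intro rest cur acc
      rw [List.cons_append, go_cons, h c (by simp), if_neg (by simp)]
      rw [ih (fun ch hc => h ch (by simp [hc])) rest (c :: cur)]
      simp

theorem go_join (ws : List (List Char))
    (h : ∀ w ∈ ws, w ≠ [] ∧ ∀ ch ∈ w, PySem.Chars.isspace ch = false) :
    ∀ acc, PySem.Chars.split₀.go (PySem.Chars.join [' '] ws) [] acc = acc.reverse ++ ws := by
  induction ws with
  | nil => intro acc; simp [PySem.Chars.join_nil, go_nil]
  | cons w ws ih =>
      intro acc
      rcases h w (by simp) with ⟨hne, hns⟩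
      cases ws with
      | nil =>
          rw [PySem.Chars.join_singleton, ← List.append_nil w, go_nospace w hns, go_nil]
          simp [hne]
      | cons w' t =>
          rw [PySem.Chars.join_cons_cons, List.append_assoc, go_nospace w hns,
            List.singleton_append, go_cons]
          have hsp : PySem.Chars.isspace ' ' = true := by decide
          rw [hsp, if_pos rfl]
          simp only [List.append_nil]
          rw [if_neg (by simp [hne]), List.reverse_reverse,
            ih (fun u hu => h u (by simp [hu])) (w :: acc)]
          simp

-- 'split(join(ws))' gives back ws when every word is nonempty and whitespace-free
theorem split₀_join (ws : List (List Char))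
    (h : ∀ w ∈ ws, w ≠ [] ∧ ∀ ch ∈ w, PySem.Chars.isspace ch = false) :
    PySem.Chars.split₀ (PySem.Chars.join [' '] ws) = ws := by
  simpa [PySem.Chars.split₀] using go_join ws h []

theorem go_good (s : List Char) : ∀ (cur : List Char) (acc : List (List Char)),
    (∀ ch ∈ cur, PySem.Chars.isspace ch = false) →
    (∀ w ∈ acc, w ≠ [] ∧ ∀ ch ∈ w, PySem.Chars.isspace ch = false) →
    ∀ w ∈ PySem.Chars.split₀.go s cur acc, w ≠ [] ∧ ∀ ch ∈ w, PySem.Chars.isspace ch = false := by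
  induction s with
  | nil =>
      intro cur acc hcur hacc w hw
      rw [go_nil] at hw
      by_cases hc : cur.isEmpty
      · rw [if_pos hc] at hw; exact hacc w (by simpa using hw)
      · rw [if_neg hc] at hw
        simp only [List.mem_reverse, List.mem_cons] at hw
        rcases hw with hw | hw
        · subst hw
          refine ⟨by simpa [List.isEmpty_eq_false_iff] using hc, ?_⟩
          intro ch hch; exact hcur ch (by simpa using hch)
        · exact hacc w hw
  | cons c s ih =>
      intro cur acc hcur hacc w hw
      rw [go_cons] at hw
      by_cases hsp : PySem.Chars.isspace c
      · rw [if_pos hsp] at hw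
        by_cases hc : cur.isEmpty
        · rw [if_pos hc] at hw; exact ih [] acc (by simp) hacc w hw
        · rw [if_neg hc] at hw
          refine ih [] (cur.reverse :: acc) (by simp) ?_ w hw
          intro u hu
          rcases List.mem_cons.mp hu with hu | hu
          · subst hu
            exact ⟨by simpa [List.isEmpty_eq_false_iff] using hc,
              fun ch hch => hcur ch (by simpa using hch)⟩
          · exact hacc u hu
      · rw [if_neg hsp] at hw
        refine ih (c :: cur) acc ?_ hacc w hw
        intro ch hch
        rcases List.mem_cons.mp hch with h1 | h1
        · subst h1; simpa using hsp
        · exact hcur ch h1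

-- every word produced by split() is nonempty and whitespace-free
theorem split₀_good (s : List Char) :
    ∀ w ∈ PySem.Chars.split₀ s, w ≠ [] ∧ ∀ ch ∈ w, PySem.Chars.isspace ch = false :=
  go_good s [] [] (by simp) (by simp)

-- xs[-j:] for 0 < j ≤ len(xs)
theorem slice_neg_from {α : Type} (l : List α) (j : ℕ) (h1 : 0 < j) (h2 : j ≤ l.length) :
    PySem.List.slice l (some (-(j : Int))) none = l.drop (l.length - j) := by
  simp only [PySem.List.slice, PySem.List.clampIdx]
  rw [if_pos (by omega), if_neg (by omega)]
  have ha : ((l.length : Int) + -(j : Int)).toNat = l.length - j := by omega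
  rw [ha]
  have hb : l.length - (l.length - j) = j := by omega
  rw [hb]
  exact List.take_of_length_le (by simp; omega)

-- the overlap of chunk k and chunk k+1 is one contiguous window of the word list
theorem ov_eq {α : Type} (ws : List α) (c o k : ℕ) (hoc : o ≤ c) :
    ((ws.drop (k * c)).take c).drop (c - o) ++ ((ws.drop ((k + 1) * c)).take c).take o
      = (ws.drop ((k + 1) * c - o)).take (2 * o) := by
  have hck : c ≤ (k + 1) * c := Nat.le_mul_of_pos_left c k.succ_pos
  rw [List.drop_take, List.drop_drop, List.take_take]
  have h1 : c - (c - o) = o := by omega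
  have h2 : k * c + (c - o) = (k + 1) * c - o := by
    have : k * c + c = (k + 1) * c := by ring
    omega
  have h3 : min o c = o := by omega
  rw [h1, h2, h3]
  have h4 : 2 * o = o + o := by omega
  rw [h4, List.take_add, List.drop_drop]
  have h5 : (k + 1) * c - o + o = (k + 1) * c := by omega
  rw [h5]

theorem fm_noclast {α : Type} (c0 : α) (f : ℕ → α) :
    ∀ m, 1 ≤ m → (List.range m).flatMap (fun k => (if k = 0 then [c0] else []) ++ [f k])
      = c0 :: (List.range m).map f := by
  intro m
  induction m with
  | zero => omega
  | succ j ih =>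
      intro _
      rcases Nat.eq_zero_or_pos j with hj | hj
      · subst hj; simp
      · rw [List.range_succ, List.flatMap_append, ih hj]
        simp [Nat.pos_iff_ne_zero.mp hj]

-- A's interleaving loop, flattened: first chunk, all overlaps, last chunk
theorem fm_boundary {α : Type} (c0 cl : α) (f : ℕ → α) (m : ℕ) (hm : 1 ≤ m) :
    (List.range m).flatMap
        (fun k => (if k = 0 then [c0] else []) ++ [f k] ++ (if k = m - 1 then [cl] else []))
      = c0 :: (List.range m).map f ++ [cl] := by
  rcases Nat.lt_or_ge m 2 with h2 | h2
  · have : m = 1 := by omega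
    subst this; simp
  · have hm1 : m - 1 + 1 = m := by omega
    rw [← hm1, List.range_succ, List.flatMap_append]
    simp only [Nat.add_sub_cancel]
    have hcongr : (List.range (m - 1)).flatMap
        (fun k => (if k = 0 then [c0] else []) ++ [f k] ++ (if k = m - 1 then [cl] else []))
        = (List.range (m - 1)).flatMap (fun k => (if k = 0 then [c0] else []) ++ [f k]) := by
      apply List.flatMap_congr
      intro k hk
      simp only [List.mem_range] at hk
      have hne : k ≠ m - 1 := by omega
      simp [hne]
    rw [hcongr, fm_noclast c0 f (m - 1) (by omega)]
    have hne : m - 1 ≠ 0 := by omega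
    simp [hne]

-- ceil(N/c) facts
theorem nc_facts (c N : ℕ) (hc : 1 ≤ c) (hN : c < N) :
    2 ≤ (N + c - 1) / c ∧ N ≤ ((N + c - 1) / c) * c ∧ (((N + c - 1) / c) - 1) * c < N := by
  set q := (N + c - 1) / c with hq
  have hd := Nat.div_add_mod (N + c - 1) c
  have hr : (N + c - 1) % c < c := Nat.mod_lt _ (by omega)
  have hqc : c * q + (N + c - 1) % c = N + c - 1 := hd
  have h1 : N ≤ q * c := by
    have : q * c = c * q := Nat.mul_comm q c
    omega
  have h2 : 2 ≤ q := by
    by_contra h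
    have : q * c ≤ 1 * c := Nat.mul_le_mul_right c (by omega)
    omega
  have h3 : (q - 1) * c < N := by
    have he : (q - 1) * c + c = q * c := by
      have h1q : 1 ≤ q := by omega
      calc (q - 1) * c + c = (q - 1 + 1) * c := by ring
        _ = q * c := by rw [Nat.sub_add_cancel h1q]
    have : c * q = q * c := Nat.mul_comm c q
    omega
  exact ⟨h2, h1, h3⟩

-- the whole main-branch computation, as a function of the word list
theorem branch_eq (ws : List (List Char))
    (hgood : ∀ w ∈ ws, w ≠ [] ∧ ∀ ch ∈ w, PySem.Chars.isspace ch = false)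
    (cs : Int) (h0 : 0 < cs) (hlt : cs < (ws.length : Int)) :
    (if 1 < (List.foldl
          (fun acc i => acc ++ [String.ofList (PySem.Chars.join [' ']
            (PySem.List.slice ws (some i) (some (i + cs))))])
          [] (PySem.List.pyRange 0 ((ws.length : Int)) cs)).length then
      List.foldl
        (fun oc i =>
          let overlap_size := max 1 (PySem.Int.floordiv cs 4)
          let oc := if i = 0 then oc ++ [PySem.List.pyGetD
            (List.foldl (fun acc i => acc ++ [String.ofList (PySem.Chars.join [' ']
              (PySem.List.slice ws (some i) (some (i + cs))))]
              ) [] (PySem.List.pyRange 0 ((ws.length : Int)) cs)) i ""] else oc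
          let current_words := PySem.Chars.split₀ (PySem.List.pyGetD
            (List.foldl (fun acc i => acc ++ [String.ofList (PySem.Chars.join [' ']
              (PySem.List.slice ws (some i) (some (i + cs))))]
              ) [] (PySem.List.pyRange 0 ((ws.length : Int)) cs)) i "").toList
          let next_words := PySem.Chars.split₀ (PySem.List.pyGetD
            (List.foldl (fun acc i => acc ++ [String.ofList (PySem.Chars.join [' ']
              (PySem.List.slice ws (some i) (some (i + cs))))]
              ) [] (PySem.List.pyRange 0 ((ws.length : Int)) cs)) (i + 1) "").toList
          let overlap := String.ofList (PySem.Chars.join [' ']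
            (PySem.List.slice current_words (some (-overlap_size)) none
              ++ PySem.List.slice next_words none (some overlap_size)))
          let oc := oc ++ [overlap]
          if i = ((List.foldl (fun acc i => acc ++ [String.ofList (PySem.Chars.join [' ']
              (PySem.List.slice ws (some i) (some (i + cs))))]
              ) [] (PySem.List.pyRange 0 ((ws.length : Int)) cs)).length : Int) - 2 then
            oc ++ [PySem.List.pyGetD
              (List.foldl (fun acc i => acc ++ [String.ofList (PySem.Chars.join [' ']
                (PySem.List.slice ws (some i) (some (i + cs))))]
                ) [] (PySem.List.pyRange 0 ((ws.length : Int)) cs)) (i + 1) ""]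
          else oc) []
        (PySem.List.pyRange 0
          (((List.foldl (fun acc i => acc ++ [String.ofList (PySem.Chars.join [' ']
              (PySem.List.slice ws (some i) (some (i + cs))))]
              ) [] (PySem.List.pyRange 0 ((ws.length : Int)) cs)).length : Int) - 1) 1)
    else (List.foldl
          (fun acc i => acc ++ [String.ofList (PySem.Chars.join [' ']
            (PySem.List.slice ws (some i) (some (i + cs))))])
          [] (PySem.List.pyRange 0 ((ws.length : Int)) cs)))
    = ((List.foldl
          (fun out i => out ++ [String.ofList (PySem.Chars.join [' ']
            (PySem.List.slice ws (some (i * cs - max 1 (PySem.Int.floordiv cs 4)))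
              (some (i * cs + max 1 (PySem.Int.floordiv cs 4)))))])
          [String.ofList (PySem.Chars.join [' '] (PySem.List.slice ws none (some cs)))]
          (PySem.List.pyRange 1 (-PySem.Int.floordiv (-(ws.length : Int)) cs) 1))
        ++ [String.ofList (PySem.Chars.join [' ']
            (PySem.List.slice ws (some ((-PySem.Int.floordiv (-(ws.length : Int)) cs - 1) * cs)) none))]) := by
  have hcs : ((cs.toNat : ℕ) : Int) = cs := Int.toNat_of_nonneg (by omega)
  set N := ws.length with hNdef
  set c := cs.toNat with hcdef
  have hc1 : 1 ≤ c := by omega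
  have hcN : c < N := by omega
  set o := max 1 (c / 4) with hodef
  have ho1 : 1 ≤ o := le_max_left _ _
  have hoc : o ≤ c := by
    have := Nat.div_le_self c 4
    omega
  set nc := (N + c - 1) / c with hncdef
  obtain ⟨hnc2, hncN, hncN'⟩ := nc_facts c N hc1 hcN
  rw [← hncdef] at hnc2 hncN hncN'
  set F : ℕ → String :=
    fun k => String.ofList (PySem.Chars.join [' '] ((ws.drop (k * c)).take c)) with hF
  set OvS : ℕ → String :=
    fun k => String.ofList (PySem.Chars.join [' '] ((ws.drop ((k + 1) * c - o)).take (2 * o))) with hOvS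
  -- overlap size as a Nat
  have hov : max 1 (PySem.Int.floordiv cs 4) = (o : Int) := by
    rw [← hcs, PySem.Int.floordiv_eq_ediv_of_pos (by norm_num : (0:Int) < 4)]
    rw [show ((4:Int)) = ((4:ℕ):Int) by norm_num, ← Int.natCast_div, hodef, Nat.cast_max]
    norm_num
  rw [hov]
  -- the chunks list is F mapped over range nc
  have hidx : PySem.List.pyRange 0 (N : Int) cs = (List.range nc).map (fun k => ((k * c : ℕ) : Int)) := by
    rw [PySem.List.pyRange_of_pos 0 (N : Int) h0, if_pos (by omega)]
    have hcount : (((N : Int) - 0 + cs - 1) / cs).toNat = nc := by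
      rw [← hcs]
      rw [show ((N : Int) - 0 + (c : Int) - 1) = ((N + c - 1 : ℕ) : Int) by push_cast [Nat.cast_sub (by omega : 1 ≤ N + c)]; ring]
      rw [← Int.natCast_div, hncdef, Int.toNat_natCast]
    rw [hcount]
    apply List.map_congr_left
    intro k _
    rw [← hcs]
    push_cast
    ring
  have hchunks : List.foldl
      (fun acc i => acc ++ [String.ofList (PySem.Chars.join [' ']
        (PySem.List.slice ws (some i) (some (i + cs))))]) []
      (PySem.List.pyRange 0 ((N : Int)) cs) = (List.range nc).map F := by
    rw [PySem.List.foldl_append_singleton_eq_map, List.nil_append, hidx, List.map_map]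
    apply List.map_congr_left
    intro k _
    simp only [Function.comp]
    rw [show ((k * c : ℕ) : Int) + cs = ((k * c + c : ℕ) : Int) by rw [← hcs]; push_cast; ring]
    rw [PySem.List.slice_natCast]
    rw [show k * c + c - k * c = c by omega]
  rw [hchunks]
  simp only [List.length_map, List.length_range]
  rw [if_pos (by omega : 1 < nc)]
  -- the words of chunk j, recovered by re-splitting
  have hW : ∀ j, PySem.Chars.split₀ (F j).toList = (ws.drop (j * c)).take c := by
    intro j
    rw [hF]
    simp only []
    rw [String.toList_ofList]
    apply split₀_join
    intro w hw
    exact hgood w (List.mem_of_mem_drop (List.mem_of_mem_take hw))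
  -- A's loop index list
  rw [show ((nc : ℕ) : Int) - 1 = ((nc - 1 : ℕ) : Int) by omega, PySem.List.pyRange_zero_natCast,
    List.foldl_map]
  -- A's loop body, simplified at each k < nc - 1
  refine Eq.trans (PySem.List.foldl_congr_mem _ _
      (fun oc k => oc ++ ((if k = 0 then [F 0] else []) ++ [OvS k]
        ++ (if k = (nc - 1) - 1 then [F (nc - 1)] else []))) _ ?_) ?_
  · intro oc k hk
    simp only [List.mem_range] at hk
    have hkc1 : (k + 1) * c ≤ (nc - 1) * c := Nat.mul_le_mul_right c (by omega)
    have hkc2 : (k + 1) * c = k * c + c := by ring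
    have hknc : k < nc := by omega
    have hk1nc : k + 1 < nc := by omega
    have hget : PySem.List.pyGetD ((List.range nc).map F) ((k : ℕ) : Int) "" = F k := by
      rw [PySem.List.pyGetD_natCast, PySem.List.getD_map_range F nc k "" hknc]
    have hget1 : PySem.List.pyGetD ((List.range nc).map F) (((k : ℕ) : Int) + 1) "" = F (k + 1) := by
      rw [show ((k : ℕ) : Int) + 1 = ((k + 1 : ℕ) : Int) by push_cast; ring,
        PySem.List.pyGetD_natCast, PySem.List.getD_map_range F nc (k + 1) "" hk1nc]
    simp only []
    rw [hget, hget1, hW, hW]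
    have hlenWk : ((ws.drop (k * c)).take c).length = c := by
      simp only [List.length_take, List.length_drop]
      omega
    rw [slice_neg_from ((ws.drop (k * c)).take c) o (by omega) (by omega), hlenWk]
    rw [PySem.List.slice_to ((ws.drop ((k + 1) * c)).take c) (by omega : (0:Int) ≤ ((o : ℕ) : Int))]
    rw [show (((o : ℕ) : Int)).toNat = o by omega]
    rw [ov_eq ws c o k hoc]
    have hFk1 : k = (nc - 1) - 1 → F (k + 1) = F (nc - 1) := fun h => by
      rw [show k + 1 = nc - 1 by omega]
    by_cases hk0 : k = 0 <;> by_cases hkl : k = (nc - 1) - 1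
    · rw [if_pos (show ((k:ℕ):Int) = ((nc:ℕ):Int) - 2 by omega), if_pos (show ((k:ℕ):Int) = 0 by omega),
        if_pos hk0, if_pos hkl, hFk1 hkl, show F k = F 0 by rw [hk0], hOvS]
      simp
    · rw [if_neg (show ¬ ((k:ℕ):Int) = ((nc:ℕ):Int) - 2 by omega), if_pos (show ((k:ℕ):Int) = 0 by omega),
        if_pos hk0, if_neg hkl, show F k = F 0 by rw [hk0], hOvS]
      simp
    · rw [if_pos (show ((k:ℕ):Int) = ((nc:ℕ):Int) - 2 by omega), if_neg (show ¬ ((k:ℕ):Int) = 0 by omega),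
        if_neg hk0, if_pos hkl, hFk1 hkl, hOvS]
      simp
    · rw [if_neg (show ¬ ((k:ℕ):Int) = ((nc:ℕ):Int) - 2 by omega), if_neg (show ¬ ((k:ℕ):Int) = 0 by omega),
        if_neg hk0, if_neg hkl, hOvS]
      simp
  rw [PySem.List.foldl_append_eq_flatMap, List.nil_append,
    fm_boundary (F 0) (F (nc - 1)) OvS (nc - 1) (by omega)]
  -- B's chunk count
  have hncB : -PySem.Int.floordiv (-((N : ℕ) : Int)) cs = ((nc : ℕ) : Int) := by
    rw [PySem.Int.neg_floordiv_neg_eq_iff_of_pos h0]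
    constructor
    · rw [← hcs, show ((nc : ℕ) : Int) - 1 = ((nc - 1 : ℕ) : Int) by omega, ← Nat.cast_mul]
      exact_mod_cast hncN'
    · rw [← hcs, ← Nat.cast_mul]
      exact_mod_cast hncN
  rw [hncB]
  -- B's first chunk
  have hB0 : PySem.List.slice ws none (some cs) = (ws.drop (0 * c)).take c := by
    rw [PySem.List.slice_to ws (le_of_lt h0)]
    rw [show cs.toNat = c from rfl, Nat.zero_mul, List.drop_zero]
  rw [hB0]
  -- B's loop index list
  have hidxB : PySem.List.pyRange 1 ((nc : ℕ) : Int) 1 = (List.range (nc - 1)).map (fun k => ((k + 1 : ℕ) : Int)) := by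
    rw [PySem.List.pyRange_of_pos 1 ((nc : ℕ) : Int) one_pos, if_pos (by omega)]
    rw [show (((nc : ℕ) : Int) - 1 + 1 - 1) / 1 = ((nc - 1 : ℕ) : Int) by rw [Int.ediv_one]; omega,
      Int.toNat_natCast]
    apply List.map_congr_left
    intro k _
    push_cast
    ring
  rw [hidxB, List.foldl_map]
  -- B's loop, as OvS mapped over range (nc - 1)
  have hBov : List.foldl
      (fun x (y : ℕ) => x ++ [String.ofList (PySem.Chars.join [' ']
        (PySem.List.slice ws (some (((y + 1 : ℕ) : Int) * cs - ((o : ℕ) : Int)))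
          (some (((y + 1 : ℕ) : Int) * cs + ((o : ℕ) : Int)))))])
      [String.ofList (PySem.Chars.join [' '] ((ws.drop (0 * c)).take c))]
      (List.range (nc - 1))
      = [F 0] ++ (List.range (nc - 1)).map OvS := by
    refine Eq.trans (PySem.List.foldl_congr_mem _ _ (fun out k => out ++ [OvS k]) _ ?_) ?_
    · intro out k hk
      simp only [List.mem_range] at hk
      have hoc1 : o ≤ (k + 1) * c := le_trans hoc (Nat.le_mul_of_pos_left c k.succ_pos)
      rw [show ((k + 1 : ℕ) : Int) * cs - ((o : ℕ) : Int) = (((k + 1) * c - o : ℕ) : Int) by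
          rw [← hcs, Nat.cast_sub hoc1]; push_cast; ring]
      rw [show ((k + 1 : ℕ) : Int) * cs + ((o : ℕ) : Int) = (((k + 1) * c + o : ℕ) : Int) by
          rw [← hcs]; push_cast; ring]
      rw [PySem.List.slice_natCast]
      rw [show (k + 1) * c + o - ((k + 1) * c - o) = 2 * o by omega]
    · rw [PySem.List.foldl_append_singleton_eq_map, hF]
  rw [hBov]
  -- B's last chunk
  have hBlast : PySem.List.slice ws (some ((((nc : ℕ) : Int) - 1) * cs)) none = ws.drop ((nc - 1) * c) := by
    rw [show (((nc : ℕ) : Int) - 1) * cs = (((nc - 1) * c : ℕ) : Int) by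
        rw [← hcs, show ((nc : ℕ) : Int) - 1 = ((nc - 1 : ℕ) : Int) by omega]; push_cast; ring]
    rw [PySem.List.slice_from ws (by omega), Int.toNat_natCast]
  rw [hBlast]
  -- A's last chunk is the whole tail of the word list
  have hFlast : F (nc - 1) = String.ofList (PySem.Chars.join [' '] (ws.drop ((nc - 1) * c))) := by
    rw [hF]
    simp only []
    rw [List.take_of_length_le]
    simp only [List.length_drop]
    have : (nc - 1) * c + c = nc * c := by
      have h1 : nc - 1 + 1 = nc := by omega
      calc (nc - 1) * c + c = (nc - 1 + 1) * c := by ring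
        _ = nc * c := by rw [h1]
    omega
  rw [hFlast]
  simp

theorem chunk_eq (query : String) (chunk_size : Int) :
    chunk_query_py query chunk_size = chunk_query_py_alt query chunk_size := by
  unfold chunk_query_py chunk_query_py_alt
  by_cases h1 : query = "" ∨ chunk_size ≤ 0
  · rw [if_pos h1, if_pos h1]
  rw [if_neg h1, if_neg h1]
  simp only []
  by_cases h2 : ((PySem.Chars.split₀ query.toList).length : Int) ≤ chunk_size
  · rw [if_pos h2, if_pos h2]
  rw [if_neg h2, if_neg h2]
  have hgood : ∀ w ∈ PySem.Chars.split₀ query.toList,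
      w ≠ [] ∧ ∀ ch ∈ w, PySem.Chars.isspace ch = false := split₀_good query.toList
  have h0 : 0 < chunk_size := by omega
  have hlt : chunk_size < ((PySem.Chars.split₀ query.toList).length : Int) := by omega
  exact branch_eq (PySem.Chars.split₀ query.toList) hgood chunk_size h0 hlt


-- ===== VERDICT (by name: the statement is the Claim_ definition above) =====
theorem chunk_query_py_spec : Claim_equal_chunk_query_py := by
  intro query chunk_size _
  unfold Spec_chunk_query_py
  exact chunk_eq query chunk_size
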